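-- pv_equiv track=rewrite | github.com/VamsiGaraga/Trial | week3_greedy_algorithms/7_maximum_salary/largest_number.py | is_greater_or_equal
-- ===== SOURCE A (Python) =====
-- def is_greater_or_equal(digit,max_digit):
--     if len(digit) == len(max_digit):
--         return int(digit) >= int(max_digit)
--     elif len(digit) > len(max_digit):
--         i = 0
--         while i < len(max_digit):
--             if digit[i] != max_digit[i]:
--                 return int(digit[i]) >= int(max_digit[i])
--             i = i+1
--         return is_greater_or_equal(digit[i:], max_digit)
--     else:
--         i = 0
--         while i < len(digit):
--             if digit[i] != max_digit[i]:
--                 return int(digit[i]) >= int(max_digit[i])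
--             i = i + 1
--         return is_greater_or_equal(digit, max_digit[i:])
-- ===== SOURCE B (Python) =====
-- def is_greater_or_equal(digit, max_digit):
--     s = digit + max_digit
--     t = max_digit + digit
--     for x, y in zip(s, t):
--         if x != y:
--             return int(x) >= int(y)
--     return int(s) >= int(t)
-- ===== Notes on version B (the rewrite author's own statement) =====
-- stated objective: simpler
-- what changed: Replaces A's recursive prefix-stripping with three length-case branches by the classic largest-number comparator: one linear scan of the two concatenations digit+max_digit and max_digit+digit, deciding at the first differing position (int comparison of the whole concatenations when they are equal); Pre_ keeps the natural domain where A decides between digits (digit-only strings, or a first differing character pair of digits), excluding inputs on which A or B raises and the sign/whitespace int()-parsable corners where A's full-int comparison is an artefact of its equal-length branch.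
-- outside the precondition, e.g. on is_greater_or_equal('+5', ' 9'): A returns False, B raises ValueError; on is_greater_or_equal('+5', '+5'): A returns True, B raises ValueError
import Mathlib
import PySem

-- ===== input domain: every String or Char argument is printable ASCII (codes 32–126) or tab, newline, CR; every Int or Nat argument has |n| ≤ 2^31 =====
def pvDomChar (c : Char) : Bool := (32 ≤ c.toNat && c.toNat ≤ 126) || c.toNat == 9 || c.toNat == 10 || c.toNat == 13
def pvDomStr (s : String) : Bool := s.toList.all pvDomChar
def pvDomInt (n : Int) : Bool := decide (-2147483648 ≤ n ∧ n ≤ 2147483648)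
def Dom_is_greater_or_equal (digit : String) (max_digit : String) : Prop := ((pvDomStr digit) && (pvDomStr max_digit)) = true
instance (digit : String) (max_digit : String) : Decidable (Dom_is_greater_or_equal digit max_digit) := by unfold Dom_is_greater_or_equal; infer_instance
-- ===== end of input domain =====

-- B replaces A's recursive prefix-stripping comparison by one linear scan of the two concatenations
-- (the classic largest-number comparator); proved equal on Pre_'s digit-decided inputs.


-- ===== PORT A =====
-- Hand port of Python's int(s): exact for non-empty strings of ASCII digits (all that Pre_ admits
-- at its call sites). On every other string Python's int raises ValueError — except sign/whitespace/
-- underscore forms such as "+5", which Pre_ also excludes; `none` stands for the raise.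
def pvIntDigits? (cs : List Char) : Option Int :=
  if cs ≠ [] ∧ cs.all Char.isDigit then
    some (cs.foldl (fun a c => 10 * a + ((c.toNat : Int) - 48)) 0)
  else none

-- Hand port of Python's int(c) on one character: exact for ASCII digits; otherwise ValueError (excluded by Pre_).
def pvDigitInt? (c : Char) : Option Int :=
  if c.isDigit then some ((c.toNat : Int) - 48) else none

-- Port of A's while loop (both branches scan index i below the shorter length): first differing pair of characters.
def igeLoop : List Char → List Char → Option (Char × Char)
  | c :: cs, e :: es => if c ≠ e then some (c, e) else igeLoop cs es
  | _, _ => none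

-- Port of A's recursion; the fuel only makes it total (fuel 0 is reached exactly where Python's
-- recursion never terminates, i.e. one string is empty — excluded by Pre_).
def igeAux : Nat → List Char → List Char → Bool
  | 0, _, _ => false
  | fuel + 1, d, m =>
    if d.length = m.length then
      match pvIntDigits? d, pvIntDigits? m with
      | some a, some b => decide (a ≥ b)
      | _, _ => false        -- Python raises ValueError here; excluded by Pre_
    else if d.length > m.length then
      match igeLoop d m with
      | some (c, e) =>
        match pvDigitInt? c, pvDigitInt? e with
        | some a, some b => decide (a ≥ b)
        | _, _ => false      -- ValueError; excluded by Pre_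
      | none => igeAux fuel (d.drop m.length) m
    else
      match igeLoop d m with
      | some (c, e) =>
        match pvDigitInt? c, pvDigitInt? e with
        | some a, some b => decide (a ≥ b)
        | _, _ => false      -- ValueError; excluded by Pre_
      | none => igeAux fuel d (m.drop d.length)

def is_greater_or_equal (digit : String) (max_digit : String) : Bool :=
  igeAux (digit.toList.length + max_digit.toList.length + 1) digit.toList max_digit.toList

-- ===== PORT B =====
-- B's for-loop over zip(s, t); s and t are carried unchanged for the final int(s) >= int(t).
def altLoop : List (Char × Char) → List Char → List Char → Bool
  | [], s, t =>
    match pvIntDigits? s, pvIntDigits? t with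
    | some a, some b => decide (a ≥ b)
    | _, _ => false          -- Python raises ValueError here; excluded by Pre_
  | (x, y) :: rest, s, t =>
    if x ≠ y then
      match pvDigitInt? x, pvDigitInt? y with
      | some a, some b => decide (a ≥ b)
      | _, _ => false        -- ValueError; excluded by Pre_
    else altLoop rest s t

def is_greater_or_equal_alt (digit : String) (max_digit : String) : Bool :=
  altLoop ((digit.toList ++ max_digit.toList).zip (max_digit.toList ++ digit.toList))
    (digit.toList ++ max_digit.toList) (max_digit.toList ++ digit.toList)

-- ===== PRECONDITION & SPEC =====
-- Pre_ admits the inputs on which the comparison is decided between digits: either both strings are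
-- non-empty and all ASCII digits, or the lengths differ and the first differing character pair is a
-- pair of digits. It excludes inputs on which A raises (ValueError on a non-digit character,
-- unbounded recursion on an empty string), inputs on which B's int() raises, and the
-- sign/whitespace int()-parsable equal-length strings such as ('+5', ' 9') or ('+5', '+5'), on
-- which A's full-int comparison is an artefact of its equal-length branch outside the digit-string
-- purpose of this helper.
def Pre_is_greater_or_equal (digit : String) (max_digit : String) : Prop :=
  (digit.toList ≠ [] ∧ max_digit.toList ≠ [] ∧
    digit.toList.all Char.isDigit = true ∧ max_digit.toList.all Char.isDigit = true) ∨
  (digit.toList ≠ [] ∧ max_digit.toList ≠ [] ∧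
    digit.toList.length ≠ max_digit.toList.length ∧
    (((digit.toList.zip max_digit.toList).dropWhile (fun q => q.1 == q.2)).head?.any
      (fun q => q.1.isDigit && q.2.isDigit)) = true)
instance (digit : String) (max_digit : String) : Decidable (Pre_is_greater_or_equal digit max_digit) := by
  unfold Pre_is_greater_or_equal; infer_instance

def pvWitness_is_greater_or_equal : String × String := ("12", "2")

def Spec_is_greater_or_equal (digit : String) (max_digit : String) (out : Bool) : Prop :=
  out = is_greater_or_equal_alt digit max_digit
instance (digit : String) (max_digit : String) (out : Bool) : Decidable (Spec_is_greater_or_equal digit max_digit out) := by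
  unfold Spec_is_greater_or_equal; infer_instance

-- ===== CLAIM (what is proved, stated in full; the proofs are below) =====
def Claim_equal_is_greater_or_equal : Prop := ∀ (digit : String) (max_digit : String), Dom_is_greater_or_equal digit max_digit → Pre_is_greater_or_equal digit max_digit → Spec_is_greater_or_equal digit max_digit (is_greater_or_equal digit max_digit)

-- ===== LEMMAS AND PROOFS =====

def f : Int → Char → Int := fun a c => 10 * a + ((c.toNat : Int) - 48)
def val (cs : List Char) : Int := cs.foldl f 0

theorem foldl_shift (cs : List Char) (a : Int) :
    cs.foldl f a = a * 10 ^ cs.length + val cs := by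
  induction cs generalizing a with
  | nil => simp [val]
  | cons c cs ih =>
    show cs.foldl f (f a c) = _
    rw [ih (f a c)]
    have : val (c :: cs) = (f 0 c) * 10 ^ cs.length + val cs := by
      show cs.foldl f (f 0 c) = _
      rw [ih (f 0 c)]
    rw [List.length_cons, this]
    simp [f]; ring

theorem digit_toNat {c : Char} (h : c.isDigit = true) : 48 ≤ c.toNat ∧ c.toNat ≤ 57 := by
  simp [Char.isDigit] at h
  exact ⟨h.1, h.2⟩

theorem val_bounds {cs : List Char} (h : cs.all Char.isDigit = true) :
    0 ≤ val cs ∧ val cs < 10 ^ cs.length := by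
  induction cs with
  | nil => simp [val]
  | cons c cs ih =>
    simp only [List.all_cons, Bool.and_eq_true] at h
    obtain ⟨h1, h2⟩ := h
    have hb := ih h2
    have hc := digit_toNat h1
    have : val (c :: cs) = (f 0 c) * 10 ^ cs.length + val cs := by
      show cs.foldl f (f 0 c) = _; rw [foldl_shift]
    rw [this, List.length_cons]
    have hp : (0:Int) < 10 ^ cs.length := by positivity
    simp only [f]
    constructor
    · nlinarith [hb.1, hb.2]
    · have hfc : (f 0 c) ≤ 9 := by simp [f]; omega
      have hfc0 : 0 ≤ f 0 c := by simp [f]; omega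
      calc f 0 c * 10 ^ cs.length + val cs < f 0 c * 10 ^ cs.length + 10 ^ cs.length := by linarith [hb.2]
        _ ≤ 9 * 10 ^ cs.length + 10 ^ cs.length := by nlinarith
        _ = 10 ^ (cs.length + 1) := by ring

theorem val_append_cons (p : List Char) (c : Char) (x : List Char) :
    val (p ++ c :: x) = val p * 10 ^ (x.length + 1) + val (c :: x) := by
  show (p ++ c :: x).foldl f 0 = _
  rw [List.foldl_append, foldl_shift (c :: x) (p.foldl f 0)]
  simp [val, List.length_cons]

-- the numeric comparison is decided at the first differing digit
theorem val_lt_of_diff {p x y : List Char} {c e : Char}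
    (hlen : x.length = y.length)
    (hx : x.all Char.isDigit = true) (hy : y.all Char.isDigit = true)
    (hlt : c.toNat < e.toNat) :
    val (p ++ c :: x) < val (p ++ e :: y) := by
  rw [val_append_cons, val_append_cons, hlen]
  have h1 : val (c :: x) < val (e :: y) := by
    have hcx : val (c :: x) = (f 0 c) * 10 ^ x.length + val x := by
      show x.foldl f (f 0 c) = _; rw [foldl_shift]
    have hey : val (e :: y) = (f 0 e) * 10 ^ y.length + val y := by
      show y.foldl f (f 0 e) = _; rw [foldl_shift]
    rw [hcx, hey, hlen]
    have hbx := val_bounds hx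
    have hby := val_bounds hy
    have hp : (0:Int) < 10 ^ y.length := by positivity
    have hfe : f 0 c + 1 ≤ f 0 e := by simp [f]; omega
    nlinarith [hbx.2, hby.1, hlen ▸ hbx.2]
  linarith

theorem igeLoop_some {d m : List Char} {c e : Char} (h : igeLoop d m = some (c, e)) :
    ∃ p x y, d = p ++ c :: x ∧ m = p ++ e :: y ∧ c ≠ e := by
  induction d generalizing m with
  | nil => cases m <;> simp [igeLoop] at h
  | cons a d ih =>
    cases m with
    | nil => simp [igeLoop] at h
    | cons b m =>
      by_cases hab : a = b
      · subst hab
        simp [igeLoop] at h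
        obtain ⟨p, x, y, h1, h2, h3⟩ := ih h
        exact ⟨a :: p, x, y, by simp [h1], by simp [h2], h3⟩
      · simp [igeLoop, hab] at h
        exact ⟨[], d, m, by simp [h.1], by simp [h.2], by rw [← h.1, ← h.2]; exact hab⟩

theorem igeLoop_none {d m : List Char} (h : igeLoop d m = none) (hlen : m.length ≤ d.length) :
    ∃ x, d = m ++ x := by
  induction d generalizing m with
  | nil =>
    cases m with
    | nil => exact ⟨[], rfl⟩
    | cons b m => simp at hlen
  | cons a d ih =>
    cases m with
    | nil => exact ⟨a :: d, rfl⟩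
    | cons b m =>
      by_cases hab : a = b
      · subst hab
        simp [igeLoop] at h
        obtain ⟨x, hx⟩ := ih h (by simpa using hlen)
        exact ⟨x, by simp [hx]⟩
      · simp [igeLoop, hab] at h

theorem igeLoop_none_swap {d m : List Char} (h : igeLoop d m = none) (hlen : d.length ≤ m.length) :
    ∃ x, m = d ++ x := by
  induction d generalizing m with
  | nil => exact ⟨m, rfl⟩
  | cons a d ih =>
    cases m with
    | nil => simp at hlen
    | cons b m =>
      by_cases hab : a = b
      · subst hab
        simp [igeLoop] at h
        obtain ⟨x, hx⟩ := ih h (by simpa using hlen)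
        exact ⟨x, by simp [hx]⟩
      · simp [igeLoop, hab] at h

theorem igeLoop_prefix (p : List Char) {x y : List Char} {c e : Char} (hne : c ≠ e) :
    igeLoop (p ++ c :: x) (p ++ e :: y) = some (c, e) := by
  induction p with
  | nil => simp [igeLoop, hne]
  | cons a p ih => simpa [igeLoop] using ih

theorem lex_strip (p x y : List Char) : ((p ++ x) < (p ++ y)) ↔ (x < y) := by
  induction p with
  | nil => rfl
  | cons c p ih => simp [ih]

theorem le_strip (p x y : List Char) : ((p ++ x) ≤ (p ++ y)) ↔ (x ≤ y) := by
  rw [← Std.not_lt, ← Std.not_lt, lex_strip]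

-- the lexicographic comparison is decided at the first differing character
theorem diff_le {p x y s t : List Char} {c e : Char}
    (hs : s = p ++ c :: x) (ht : t = p ++ e :: y) (hne : c ≠ e) :
    (t ≤ s) ↔ e.toNat ≤ c.toNat := by
  subst hs ht
  rw [← Std.not_lt, lex_strip, List.cons_lt_cons_iff]
  have : ¬ (c = e) := hne
  simp only [this, false_and, or_false]
  rw [Char.lt_def, UInt32.lt_iff_toNat_lt]
  show ¬ (c.toNat < e.toNat) ↔ _
  omega

theorem diff_lex {p x y d m : List Char} {c e : Char}
    (hd : d = p ++ c :: x) (hm : m = p ++ e :: y) (hne : c ≠ e) :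
    ((m ++ d) ≤ (d ++ m)) ↔ e.toNat ≤ c.toNat := by
  exact diff_le (p := p) (x := x ++ m) (y := y ++ d)
    (by rw [hd, hm]; simp) (by rw [hd, hm]; simp) hne

theorem pvIntDigits?_digits {cs : List Char} (h1 : cs ≠ []) (h2 : cs.all Char.isDigit = true) :
    pvIntDigits? cs = some (val cs) := by
  simp [pvIntDigits?, h1, h2]; rfl

theorem char_toNat_inj {c e : Char} (h : c.toNat = e.toNat) : c = e := by
  apply Char.ext; apply UInt32.toNat_inj.mp; exact h

theorem diff_branch {c e : Char} (hc : c.isDigit = true) (he : e.isDigit = true) (hne : c ≠ e)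
    {p x y d m : List Char} (hd : d = p ++ c :: x) (hm : m = p ++ e :: y) :
    (match pvDigitInt? c, pvDigitInt? e with
      | some a, some b => decide (a ≥ b)
      | _, _ => false) = decide ((m ++ d) ≤ (d ++ m)) := by
  simp only [pvDigitInt?, hc, he, if_pos]
  rw [decide_eq_decide, diff_lex hd hm hne]
  omega

theorem main_lemma : ∀ (fuel : Nat) (d m : List Char),
    d.length + m.length < fuel → d ≠ [] → m ≠ [] →
    d.all Char.isDigit = true → m.all Char.isDigit = true →
    igeAux fuel d m = decide ((m ++ d) ≤ (d ++ m)) := by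
  intro fuel
  induction fuel with
  | zero => intro d m hlt; omega
  | succ fuel ih =>
    intro d m hlt hd hm hda hma
    have hdl : 0 < d.length := List.length_pos_iff.mpr hd
    have hml : 0 < m.length := List.length_pos_iff.mpr hm
    simp only [igeAux]
    split_ifs with h1 h2
    · -- equal lengths
      rw [pvIntDigits?_digits hd hda, pvIntDigits?_digits hm hma]
      rcases hcase : igeLoop d m with _ | ⟨c, e⟩
      · obtain ⟨x, hx⟩ := igeLoop_none hcase (le_of_eq h1.symm)
        have hx0 : x = [] := by
          have := congrArg List.length hx
          simp [h1] at this
          exact this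
        subst hx0
        simp at hx
        subst hx
        simp
      · obtain ⟨p, x, y, hdp, hmp, hne⟩ := igeLoop_some hcase
        have hxy : x.length = y.length := by
          have h1' := h1
          rw [hdp, hmp] at h1'
          simp at h1'; omega
        have hcd : c.isDigit = true ∧ x.all Char.isDigit = true := by
          rw [hdp] at hda
          simp only [List.all_append, List.all_cons, Bool.and_eq_true] at hda
          exact ⟨hda.2.1, hda.2.2⟩
        have hce : e.isDigit = true ∧ y.all Char.isDigit = true := by
          rw [hmp] at hma
          simp only [List.all_append, List.all_cons, Bool.and_eq_true] at hma
          exact ⟨hma.2.1, hma.2.2⟩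
        have hnetn : c.toNat ≠ e.toNat := fun hh => hne (char_toNat_inj hh)
        rw [decide_eq_decide, diff_lex hdp hmp hne]
        rcases Nat.lt_or_ge c.toNat e.toNat with hlt' | hge'
        · have := val_lt_of_diff (p := p) hxy hcd.2 hce.2 hlt'
          rw [← hdp, ← hmp] at this
          constructor
          · intro h; omega
          · intro h; omega
        · have hgt : e.toNat < c.toNat := by omega
          have := val_lt_of_diff (p := p) hxy.symm hce.2 hcd.2 hgt
          rw [← hdp, ← hmp] at this
          constructor
          · intro h; omega
          · intro h; omega
    · -- d longer
      rcases hcase : igeLoop d m with _ | ⟨c, e⟩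
      · obtain ⟨x, hx⟩ := igeLoop_none hcase (by omega)
        have hxne : x ≠ [] := by
          intro h; subst h; simp at hx; subst hx; omega
        have hdrop : d.drop m.length = x := by rw [hx]; exact List.drop_left
        rw [hdrop]
        have hxd : x.all Char.isDigit = true := by
          rw [hx] at hda
          simp only [List.all_append, Bool.and_eq_true] at hda
          exact hda.2
        have hxl : x.length + m.length < fuel := by
          have := congrArg List.length hx
          simp at this; omega
        rw [ih x m hxl hxne hm hxd hma, decide_eq_decide, hx,
           List.append_assoc m x m, le_strip]
      · obtain ⟨p, x, y, hdp, hmp, hne⟩ := igeLoop_some hcase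
        have hcd : c.isDigit = true := by
          rw [hdp] at hda
          simp only [List.all_append, List.all_cons, Bool.and_eq_true] at hda
          exact hda.2.1
        have hce : e.isDigit = true := by
          rw [hmp] at hma
          simp only [List.all_append, List.all_cons, Bool.and_eq_true] at hma
          exact hma.2.1
        exact diff_branch hcd hce hne hdp hmp
    · -- m longer
      rcases hcase : igeLoop d m with _ | ⟨c, e⟩
      · obtain ⟨x, hx⟩ := igeLoop_none_swap hcase (by omega)
        have hxne : x ≠ [] := by
          intro h; subst h; simp at hx; subst hx; omega
        have hdrop : m.drop d.length = x := by rw [hx]; exact List.drop_left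
        rw [hdrop]
        have hxd : x.all Char.isDigit = true := by
          rw [hx] at hma
          simp only [List.all_append, Bool.and_eq_true] at hma
          exact hma.2
        have hxl : d.length + x.length < fuel := by
          have := congrArg List.length hx
          simp at this; omega
        rw [ih d x hxl hd hxne hda hxd, decide_eq_decide, hx,
           List.append_assoc d x d, le_strip]
      · obtain ⟨p, x, y, hdp, hmp, hne⟩ := igeLoop_some hcase
        have hcd : c.isDigit = true := by
          rw [hdp] at hda
          simp only [List.all_append, List.all_cons, Bool.and_eq_true] at hda
          exact hda.2.1
        have hce : e.isDigit = true := by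
          rw [hmp] at hma
          simp only [List.all_append, List.all_cons, Bool.and_eq_true] at hma
          exact hma.2.1
        exact diff_branch hcd hce hne hdp hmp

-- B's scan skips the equal pairs contributed by a common prefix
theorem altLoop_skip (p : List Char) (zs : List (Char × Char)) (s t : List Char) :
    altLoop (p.zip p ++ zs) s t = altLoop zs s t := by
  induction p with
  | nil => rfl
  | cons a p ih => simpa [altLoop] using ih

-- B's value on two digit strings of equal length is their lexicographic comparison
theorem altB_digits {s t : List Char} (hlen : s.length = t.length)
    (hs : s.all Char.isDigit = true) (ht : t.all Char.isDigit = true) (hsn : s ≠ []) :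
    altLoop (s.zip t) s t = decide (t ≤ s) := by
  rcases hcase : igeLoop s t with _ | ⟨c, e⟩
  · obtain ⟨x, hx⟩ := igeLoop_none hcase (le_of_eq hlen.symm)
    have hx0 : x = [] := by
      have := congrArg List.length hx
      simp [hlen] at this
      exact this
    subst hx0
    simp at hx
    subst hx
    rw [show s.zip s = s.zip s ++ [] from by simp, altLoop_skip]
    show (match pvIntDigits? s, pvIntDigits? s with
          | some a, some b => decide (a ≥ b)
          | _, _ => false) = _
    rw [pvIntDigits?_digits hsn hs]
    simp
  · obtain ⟨p, x, y, hsp, htp, hne⟩ := igeLoop_some hcase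
    have hc : c.isDigit = true := by
      rw [hsp] at hs
      simp only [List.all_append, List.all_cons, Bool.and_eq_true] at hs
      exact hs.2.1
    have he : e.isDigit = true := by
      rw [htp] at ht
      simp only [List.all_append, List.all_cons, Bool.and_eq_true] at ht
      exact ht.2.1
    rw [show s.zip t = p.zip p ++ (c, e) :: x.zip y from by
          rw [hsp, htp, List.zip_append (by rfl)]; rfl,
        altLoop_skip]
    simp only [altLoop, if_pos hne, pvDigitInt?, hc, he, if_pos]
    rw [decide_eq_decide, diff_le hsp htp hne]
    omega

-- the first differing character pair of two lists, as seen through zip/dropWhile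
theorem zip_diff : ∀ {d m : List Char} {c e : Char},
    (((d.zip m).dropWhile (fun q => q.1 == q.2)).head? = some (c, e)) →
    ∃ p x y, d = p ++ c :: x ∧ m = p ++ e :: y ∧ c ≠ e := by
  intro d
  induction d with
  | nil => intro m c e h; simp at h
  | cons a d ih =>
    intro m c e h
    cases m with
    | nil => simp at h
    | cons b m =>
      by_cases hab : a = b
      · subst hab
        simp at h
        obtain ⟨p, x, y, h1, h2, h3⟩ := ih h
        exact ⟨a :: p, x, y, by simp [h1], by simp [h2], h3⟩
      · have hab' : ((a, b).1 == (a, b).2) = false := by simpa using hab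
        rw [List.zip_cons_cons, List.dropWhile_cons_of_neg (by simp [hab'])] at h
        simp at h
        exact ⟨[], d, m, by simp [h.1], by simp [h.2], by rw [← h.1, ← h.2]; exact hab⟩

-- ===== VERDICT (by name: the statement is the Claim_ definition above) =====
theorem is_greater_or_equal_spec : Claim_equal_is_greater_or_equal := by
  intro digit max_digit _ hpre
  unfold Spec_is_greater_or_equal is_greater_or_equal is_greater_or_equal_alt
  rcases hpre with ⟨hd, hm, hda, hma⟩ | ⟨hd, hm, hlen, hzip⟩
  · rw [main_lemma _ _ _ (by omega) hd hm hda hma]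
    exact (altB_digits (by simp; omega)
      (by simp only [List.all_append, Bool.and_eq_true]; exact ⟨hda, hma⟩)
      (by simp only [List.all_append, Bool.and_eq_true]; exact ⟨hma, hda⟩)
      (by simp [hd])).symm
  · rcases hh : ((digit.toList.zip max_digit.toList).dropWhile (fun q => q.1 == q.2)).head? with _ | ⟨c, e⟩
    · rw [hh] at hzip; simp at hzip
    · rw [hh] at hzip
      simp only [Option.any_some, Bool.and_eq_true] at hzip
      obtain ⟨hc, he⟩ := hzip
      obtain ⟨p, x, y, hdp, hmp, hne⟩ := zip_diff hh
      have hloop : igeLoop digit.toList max_digit.toList = some (c, e) := by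
        rw [hdp, hmp]; exact igeLoop_prefix p hne
      have hzipc : (digit.toList ++ max_digit.toList).zip (max_digit.toList ++ digit.toList)
          = p.zip p ++ (c, e) :: (x ++ max_digit.toList).zip (y ++ digit.toList) := by
        rw [hdp, hmp]
        rw [show (p ++ c :: x) ++ (p ++ e :: y) = p ++ (c :: (x ++ (p ++ e :: y))) from by simp,
            show (p ++ e :: y) ++ (p ++ c :: x) = p ++ (e :: (y ++ (p ++ c :: x))) from by simp,
            List.zip_append (by rfl)]
        simp
      rw [hzipc, altLoop_skip]
      simp only [igeAux, if_neg hlen, hloop, altLoop, if_pos hne]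
      split_ifs <;> rfl
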